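-- pv_equiv track=rewrite | github.com/Kennelly57/carleton-cs-321 | Memes.py | qual2quant
-- ===== SOURCE A (Python) =====
-- import copy
--
-- def qual2quant(normalized, size):
--     new_scores = []
--     sorted_norm = copy.copy(normalized)
--     sorted_norm.sort()
--     max_length = len(sorted_norm)
--
--     if size == 2:
--         bin_size = int(max_length/2)
--         first_half = sorted_norm[bin_size]
--         for score in normalized:
--             if score < first_half:
--                 new_scores.append(0)
--             else:
--                 new_scores.append(1)
--
--     if size == 5:
--         bin_size = int(max_length/5)
--         first_20 = sorted_norm[bin_size]
--         second_20 = sorted_norm[bin_size*2]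
--         third_20 = sorted_norm[bin_size*3]
--         fourth_20 = sorted_norm[bin_size*4]
--         for score in normalized:
--             if score < first_20:
--                 new_scores.append(0)
--             elif first_20 <= score < second_20:
--                 new_scores.append(1)
--             elif second_20 <= score < third_20:
--                 new_scores.append(2)
--             elif third_20 <= score < fourth_20:
--                 new_scores.append(3)
--             elif fourth_20 <= score:
--                 new_scores.append(4)
--
--     return new_scores
-- ===== SOURCE B (Python) =====
-- def qual2quant(normalized, size):
--     # Sort-free rank counting: an element's bucket is its clamped (rank-1) // step,
--     # where rank = number of elements <= it; no sorted copy, no threshold values.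
--     if size != 2 and size != 5:
--         return []
--     step = len(normalized) // size
--     def rank(x):
--         c = 0
--         for e in normalized:
--             if e <= x:
--                 c += 1
--         return c
--     return [size - 1 if step == 0 else min(size - 1, (rank(x) - 1) // step)
--             for x in normalized]
-- ===== Notes on version B (the rewrite author's own statement) =====
-- stated objective: alternative
-- what changed: Replaces A's sort-then-threshold scheme (sorted copy, cutpoint values at multiples of n//size, branch cascade) with a sort-free rank count: each element's bucket is min(size-1, (rank-1)//step) where rank = number of elements <= it; correct because sorted[k] <= x iff at least k+1 elements are <= x.
import Mathlib
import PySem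

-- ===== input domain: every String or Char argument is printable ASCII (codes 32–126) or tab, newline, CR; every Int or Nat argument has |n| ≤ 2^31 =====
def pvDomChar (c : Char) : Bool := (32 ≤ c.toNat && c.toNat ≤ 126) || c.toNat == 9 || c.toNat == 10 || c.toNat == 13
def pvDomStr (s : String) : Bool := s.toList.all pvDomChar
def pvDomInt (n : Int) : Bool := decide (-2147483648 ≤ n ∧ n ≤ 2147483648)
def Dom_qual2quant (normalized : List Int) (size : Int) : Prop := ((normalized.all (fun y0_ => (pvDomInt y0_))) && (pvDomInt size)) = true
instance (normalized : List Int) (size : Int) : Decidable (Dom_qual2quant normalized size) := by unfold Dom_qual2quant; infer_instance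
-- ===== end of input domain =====

-- B replaces A's sort-then-threshold scheme with a sort-free rank count: each element's
-- bucket is min(size-1, (rank-1)//step) where rank = #{e : e ≤ x} (same return value;
-- neither A nor B mutates its argument).

-- ===== PORT A =====
def qual2quant (normalized : List Int) (size : Int) : List Int :=
  let sorted_norm := PySem.List.sorted normalized (fun x => x) false
  let max_length : Int := (normalized.length : Int)
  let s2 : List Int :=
    if size = 2 then
      let bin_size := PySem.Int.floordiv max_length 2  -- int(n/2): n ≥ 0, truncation = floor
      match PySem.List.pyGet? sorted_norm bin_size with
      | none => []  -- Python raises IndexError here; excluded by Pre_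
      | some first_half =>
          normalized.foldl (fun acc score =>
            acc ++ [if score < first_half then (0 : Int) else 1]) []
    else []
  if size = 5 then
    let bin_size := PySem.Int.floordiv max_length 5
    match PySem.List.pyGet? sorted_norm bin_size,
          PySem.List.pyGet? sorted_norm (bin_size * 2),
          PySem.List.pyGet? sorted_norm (bin_size * 3),
          PySem.List.pyGet? sorted_norm (bin_size * 4) with
    | some t1, some t2, some t3, some t4 =>
        normalized.foldl (fun acc score =>
          acc ++ (if score < t1 then [(0 : Int)]
                  else if t1 ≤ score ∧ score < t2 then [1]
                  else if t2 ≤ score ∧ score < t3 then [2]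
                  else if t3 ≤ score ∧ score < t4 then [3]
                  else if t4 ≤ score then [4]
                  else [])) s2
    | _, _, _, _ => s2  -- Python raises IndexError; excluded by Pre_
  else s2

-- ===== PORT B =====
def qual2quant_alt (normalized : List Int) (size : Int) : List Int :=
  if size ≠ 2 ∧ size ≠ 5 then []
  else
    let step : Int := PySem.Int.floordiv (normalized.length : Int) size
    normalized.map (fun x =>
      let c : Int := normalized.foldl (fun a e => if e ≤ x then a + 1 else a) 0  -- rank(x)
      if step = 0 then size - 1 else min (size - 1) (PySem.Int.floordiv (c - 1) step))

-- ===== PRECONDITION & SPEC =====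
-- Pre_ excludes exactly the inputs where A raises IndexError: an empty list with size 2 or 5.
def Pre_qual2quant (normalized : List Int) (size : Int) : Prop :=
  normalized ≠ [] ∨ (size ≠ 2 ∧ size ≠ 5)
instance (normalized : List Int) (size : Int) : Decidable (Pre_qual2quant normalized size) := by
  unfold Pre_qual2quant; infer_instance
def pvWitness_qual2quant : List Int × Int := ([3, 1, 4, 1, 5, 9, 2, 6], 5)

def Spec_qual2quant (normalized : List Int) (size : Int) (out : List Int) : Prop := out = qual2quant_alt normalized size
instance (normalized : List Int) (size : Int) (out : List Int) : Decidable (Spec_qual2quant normalized size out) := by unfold Spec_qual2quant; infer_instance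

-- ===== CLAIM (what is proved, stated in full; the proofs are below) =====
def Claim_equal_qual2quant : Prop := ∀ (normalized : List Int) (size : Int), Dom_qual2quant normalized size → Pre_qual2quant normalized size → Spec_qual2quant normalized size (qual2quant normalized size)

-- ===== LEMMAS AND PROOFS =====

-- Order statistic vs rank, on any nondecreasing list: s[k] ≤ x iff ≥ k+1 elements are ≤ x.
lemma sorted_rank_iff (s : List Int) (x : Int) (k : Nat)
    (hpw : s.Pairwise (· ≤ ·)) (hk : k < s.length) :
    (s[k] ≤ x) ↔ k + 1 ≤ s.countP (fun e => decide (e ≤ x)) := by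
  have hmono : ∀ i j (hij : i ≤ j) (hj : j < s.length),
      s[i]'(Nat.lt_of_le_of_lt hij hj) ≤ s[j]'hj := by
    intro i j hij hj
    rcases Nat.eq_or_lt_of_le hij with rfl | h
    · exact le_refl _
    · exact (List.pairwise_iff_getElem.mp hpw) i j (by omega) hj h
  constructor
  · intro h
    have htake : (s.take (k + 1)).countP (fun e => decide (e ≤ x)) = k + 1 := by
      rw [List.countP_eq_length.mpr, List.length_take]
      · omega
      · intro a ha
        obtain ⟨i, hi, hia⟩ := List.getElem_of_mem ha
        have hik : i ≤ k := by
          have := hi; rw [List.length_take] at this; omega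
        have heq : (s.take (k + 1))[i]'hi = s[i]'(by
          have := hi; rw [List.length_take] at this; omega) := List.getElem_take
        have hle : s[i]'(by have := hi; rw [List.length_take] at this; omega) ≤ s[k]'hk :=
          hmono i k hik hk
        simp only [← hia, heq, decide_eq_true_eq]
        exact le_trans hle h
    calc k + 1 = (s.take (k + 1)).countP (fun e => decide (e ≤ x)) := htake.symm
      _ ≤ (s.take (k + 1)).countP (fun e => decide (e ≤ x))
            + (s.drop (k + 1)).countP (fun e => decide (e ≤ x)) := by omega
      _ = s.countP (fun e => decide (e ≤ x)) := by
            rw [← List.countP_append, List.take_append_drop]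
  · intro hcnt
    by_contra hlt
    have hlt : x < s[k]'hk := by omega
    have hdrop : (s.drop k).countP (fun e => decide (e ≤ x)) = 0 := by
      rw [List.countP_eq_zero]
      intro a ha
      obtain ⟨i, hi, hia⟩ := List.getElem_of_mem ha
      have hi' : k + i < s.length := by
        have := hi; rw [List.length_drop] at this; omega
      have heq : (s.drop k)[i]'hi = s[k + i]'hi' := List.getElem_drop
      have hge : s[k]'hk ≤ s[k + i]'hi' := hmono k (k + i) (Nat.le_add_right k i) hi'
      simp only [← hia, heq, decide_eq_true_eq]
      omega
    have htake : (s.take k).countP (fun e => decide (e ≤ x)) ≤ k := by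
      calc (s.take k).countP (fun e => decide (e ≤ x)) ≤ (s.take k).length :=
            List.countP_le_length
        _ ≤ k := by rw [List.length_take]; omega
    have hsum : s.countP (fun e => decide (e ≤ x))
        = (s.take k).countP (fun e => decide (e ≤ x))
          + (s.drop k).countP (fun e => decide (e ≤ x)) := by
      rw [← List.countP_append, List.take_append_drop]
    omega

-- Specialised to Python's sorted(l): sorted(l)[k] ≤ x iff ≥ k+1 elements of l are ≤ x.
lemma sorted_getElem_le_iff (l : List Int) (x : Int) (k : Nat)
    (hk : k < (PySem.List.sorted l (fun y => y) false).length) :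
    ((PySem.List.sorted l (fun y => y) false)[k] ≤ x) ↔
      k + 1 ≤ l.countP (fun e => decide (e ≤ x)) := by
  rw [← (PySem.List.sorted_perm l (fun y => y) false).countP_eq]
  exact sorted_rank_iff _ x k (PySem.List.sorted_pairwise l (fun y => y)) hk

-- rank-to-bucket arithmetic, two thresholds... (one-cut and four-cut forms)
lemma min_ind1 (c st : Nat) (hst : 1 ≤ st) :
    (if st + 1 ≤ c then (1 : Int) else 0) = min (1 : Int) (((c - 1) / st : Nat) : Int) := by
  have h1 : 1 ≤ (c - 1) / st ↔ 1 * st ≤ c - 1 := Nat.le_div_iff_mul_le hst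
  generalize (c - 1) / st = q at h1
  split_ifs with h <;> omega

lemma min_ind4 (c st : Nat) (hst : 1 ≤ st) :
    ((((0 : Int) + (if st * 1 + 1 ≤ c then 1 else 0)) + (if st * 2 + 1 ≤ c then 1 else 0))
        + (if st * 3 + 1 ≤ c then 1 else 0)) + (if st * 4 + 1 ≤ c then 1 else 0)
      = min (4 : Int) (((c - 1) / st : Nat) : Int) := by
  have h1 : 1 ≤ (c - 1) / st ↔ 1 * st ≤ c - 1 := Nat.le_div_iff_mul_le hst
  have h2 : 2 ≤ (c - 1) / st ↔ 2 * st ≤ c - 1 := Nat.le_div_iff_mul_le hst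
  have h3 : 3 ≤ (c - 1) / st ↔ 3 * st ≤ c - 1 := Nat.le_div_iff_mul_le hst
  have h4 : 4 ≤ (c - 1) / st ↔ 4 * st ≤ c - 1 := Nat.le_div_iff_mul_le hst
  generalize (c - 1) / st = q at h1 h2 h3 h4
  split_ifs <;> omega

-- A's five-way branch list is the singleton holding the sum of four threshold indicators.
lemma branch5_eq_count (t1 t2 t3 t4 x : Int) (h12 : t1 ≤ t2) (h23 : t2 ≤ t3) (h34 : t3 ≤ t4) :
    (if x < t1 then [(0 : Int)]
     else if t1 ≤ x ∧ x < t2 then [1]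
     else if t2 ≤ x ∧ x < t3 then [2]
     else if t3 ≤ x ∧ x < t4 then [3]
     else if t4 ≤ x then [4]
     else [])
    = [(((((0 : Int) + (if t1 ≤ x then 1 else 0)) + (if t2 ≤ x then 1 else 0))
          + (if t3 ≤ x then 1 else 0)) + (if t4 ≤ x then 1 else 0))] := by
  split_ifs <;> simp_all <;> omega

lemma foldl_flat5 (t1 t2 t3 t4 : Int) (h12 : t1 ≤ t2) (h23 : t2 ≤ t3) (h34 : t3 ≤ t4)
    (l : List Int) (acc : List Int) :
    l.foldl (fun acc score =>
      acc ++ (if score < t1 then [(0 : Int)]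
              else if t1 ≤ score ∧ score < t2 then [1]
              else if t2 ≤ score ∧ score < t3 then [2]
              else if t3 ≤ score ∧ score < t4 then [3]
              else if t4 ≤ score then [4]
              else [])) acc
    = acc ++ l.map (fun x =>
        ((((0 : Int) + (if t1 ≤ x then 1 else 0)) + (if t2 ≤ x then 1 else 0))
          + (if t3 ≤ x then 1 else 0)) + (if t4 ≤ x then 1 else 0)) := by
  induction l generalizing acc with
  | nil => simp
  | cons y ys ih =>
      simp only [List.foldl_cons, List.map_cons]
      rw [branch5_eq_count t1 t2 t3 t4 y h12 h23 h34, ih]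
      simp

theorem qual2quant_spec : Claim_equal_qual2quant := by
  intro normalized size _hdom hpre
  unfold Spec_qual2quant qual2quant qual2quant_alt
  by_cases h2 : size = 2
  · subst h2
    rcases hpre with hne | ⟨habs, _⟩
    · have hn : 0 < normalized.length := List.length_pos_iff.mpr hne
      have hlen : (PySem.List.sorted normalized (fun x => x) false).length = normalized.length :=
        PySem.List.length_sorted normalized (fun x => x) false
      have hfd : PySem.Int.floordiv ((normalized.length : Nat) : Int) 2
          = ((normalized.length / 2 : Nat) : Int) := by
        exact_mod_cast PySem.Int.floordiv_natCast normalized.length 2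
      have hidx : normalized.length / 2 < (PySem.List.sorted normalized (fun x => x) false).length := by
        rw [hlen]; omega
      simp only [if_neg (by norm_num : ¬((2 : Int) = 5)), ne_eq, not_true_eq_false, false_and,
        if_false]
      rw [hfd, PySem.List.pyGet?_natCast, List.getElem?_eq_getElem hidx]
      simp only [PySem.List.foldl_append_singleton_eq_map, List.nil_append]
      refine List.map_congr_left (fun x hx => ?_)
      have hc1 : 0 < normalized.countP (fun e => decide (e ≤ x)) :=
        List.countP_pos_iff.mpr ⟨x, hx, by simp⟩
      have hfold : normalized.foldl (fun a e => if e ≤ x then a + 1 else a) (0 : Int)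
          = 0 + (normalized.countP (fun e => decide (e ≤ x)) : Int) :=
        PySem.List.foldl_ite_add_one (fun e => e ≤ x) normalized 0
      have hkey := sorted_getElem_le_iff normalized x (normalized.length / 2) hidx
      simp only [hfold, zero_add]
      by_cases hz : normalized.length / 2 = 0
      · rw [if_pos (show ((normalized.length / 2 : Nat) : Int) = 0 from by exact_mod_cast hz)]
        have hle : (PySem.List.sorted normalized (fun x => x) false)[normalized.length / 2] ≤ x :=
          hkey.mpr (by omega)
        rw [if_neg (not_lt.mpr hle)]; norm_num
      · have hz1 : 1 ≤ normalized.length / 2 := by omega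
        rw [if_neg (show ¬((normalized.length / 2 : Nat) : Int) = 0 from by exact_mod_cast hz)]
        have hm1 : ((normalized.countP (fun e => decide (e ≤ x)) : Int) - 1)
            = ((normalized.countP (fun e => decide (e ≤ x)) - 1 : Nat) : Int) := by omega
        rw [hm1]
        rw [show PySem.Int.floordiv
              ((normalized.countP (fun e => decide (e ≤ x)) - 1 : Nat) : Int)
              ((normalized.length / 2 : Nat) : Int)
            = (((normalized.countP (fun e => decide (e ≤ x)) - 1) / (normalized.length / 2) : Nat) : Int) from by
          exact_mod_cast PySem.Int.floordiv_natCast _ _]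
        rw [show ((2 : Int) - 1) = 1 from by norm_num,
          ← min_ind1 (normalized.countP (fun e => decide (e ≤ x))) (normalized.length / 2) hz1]
        by_cases hle : (PySem.List.sorted normalized (fun x => x) false)[normalized.length / 2] ≤ x
        · rw [if_neg (not_lt.mpr hle), if_pos (by have := hkey.mp hle; omega)]
        · rw [if_pos (lt_of_not_ge hle), if_neg (fun hc => hle (hkey.mpr (by omega)))]
    · exact absurd rfl habs
  · by_cases h5 : size = 5
    · subst h5
      simp only [if_neg (by norm_num : ¬((5 : Int) = 2)),
        if_neg (show ¬(¬((5 : Int) = 2) ∧ ¬((5 : Int) = 5)) by simp)]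
      rcases hpre with hne | ⟨_, habs⟩
      · have hn : 0 < normalized.length := List.length_pos_iff.mpr hne
        have hlen : (PySem.List.sorted normalized (fun x => x) false).length = normalized.length :=
          PySem.List.length_sorted normalized (fun x => x) false
        set s := PySem.List.sorted normalized (fun x => x) false with hs
        have hfd : PySem.Int.floordiv ((normalized.length : Nat) : Int) 5
            = ((normalized.length / 5 : Nat) : Int) := by
          exact_mod_cast PySem.Int.floordiv_natCast normalized.length 5
        have hidx : ∀ i : Nat, i ≤ 4 → normalized.length / 5 * i < s.length := by
          intro i hi; rw [hlen]; interval_cases i <;> omega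
        have hget : ∀ i : Nat, (hi : i ≤ 4) →
            PySem.List.pyGet? s (((normalized.length / 5 : Nat) : Int) * (i : Int))
              = some (s[normalized.length / 5 * i]'(hidx i hi)) := by
          intro i hi
          have : (((normalized.length / 5 : Nat) : Int) * (i : Int))
              = ((normalized.length / 5 * i : Nat) : Int) := by push_cast; ring
          rw [this, PySem.List.pyGet?_natCast, List.getElem?_eq_getElem (hidx i hi)]
        have hg1 := hget 1 (by norm_num)
        have hg2 := hget 2 (by norm_num)
        have hg3 := hget 3 (by norm_num)
        have hg4 := hget 4 (by norm_num)
        have h12 : s[normalized.length / 5 * 1]'(hidx 1 (by norm_num))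
            ≤ s[normalized.length / 5 * 2]'(hidx 2 (by norm_num)) :=
          PySem.List.sorted_id_getElem_mono normalized (by omega) (hidx 2 (by norm_num))
        have h23 : s[normalized.length / 5 * 2]'(hidx 2 (by norm_num))
            ≤ s[normalized.length / 5 * 3]'(hidx 3 (by norm_num)) :=
          PySem.List.sorted_id_getElem_mono normalized (by omega) (hidx 3 (by norm_num))
        have h34 : s[normalized.length / 5 * 3]'(hidx 3 (by norm_num))
            ≤ s[normalized.length / 5 * 4]'(hidx 4 (by norm_num)) :=
          PySem.List.sorted_id_getElem_mono normalized (by omega) (hidx 4 (by norm_num))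
        rw [hfd]
        have hmul1 : ((normalized.length / 5 : Nat) : Int)
            = ((normalized.length / 5 : Nat) : Int) * ((1 : Nat) : Int) := by push_cast; ring
        rw [show PySem.List.pyGet? s ((normalized.length / 5 : Nat) : Int)
              = some (s[normalized.length / 5 * 1]'(hidx 1 (by norm_num))) from by
            rw [hmul1]; exact hg1]
        rw [show ((normalized.length / 5 : Nat) : Int) * 2
              = ((normalized.length / 5 : Nat) : Int) * ((2 : Nat) : Int) from by push_cast; ring]
        rw [show ((normalized.length / 5 : Nat) : Int) * 3
              = ((normalized.length / 5 : Nat) : Int) * ((3 : Nat) : Int) from by push_cast; ring]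
        rw [show ((normalized.length / 5 : Nat) : Int) * 4
              = ((normalized.length / 5 : Nat) : Int) * ((4 : Nat) : Int) from by push_cast; ring]
        rw [hg2, hg3, hg4]
        simp only [if_true]
        rw [foldl_flat5 _ _ _ _ h12 h23 h34]
        simp only [List.nil_append]
        refine List.map_congr_left (fun x hx => ?_)
        have hc1 : 0 < normalized.countP (fun e => decide (e ≤ x)) :=
          List.countP_pos_iff.mpr ⟨x, hx, by simp⟩
        have hfold : normalized.foldl (fun a e => if e ≤ x then a + 1 else a) (0 : Int)
            = 0 + (normalized.countP (fun e => decide (e ≤ x)) : Int) :=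
          PySem.List.foldl_ite_add_one (fun e => e ≤ x) normalized 0
        have hkey : ∀ i : Nat, (hi : i ≤ 4) →
            ((s[normalized.length / 5 * i]'(hidx i hi) ≤ x)
              ↔ normalized.length / 5 * i + 1 ≤ normalized.countP (fun e => decide (e ≤ x))) := by
          intro i hi
          exact sorted_getElem_le_iff normalized x (normalized.length / 5 * i) (hidx i hi)
        have hk1 := hkey 1 (by norm_num)
        have hk2 := hkey 2 (by norm_num)
        have hk3 := hkey 3 (by norm_num)
        have hk4 := hkey 4 (by norm_num)
        simp only [hfold, zero_add, hk1, hk2, hk3, hk4]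
        by_cases hz : normalized.length / 5 = 0
        · rw [if_pos (show ((normalized.length / 5 : Nat) : Int) = 0 from by exact_mod_cast hz)]
          split_ifs <;> omega
        · have hz1 : 1 ≤ normalized.length / 5 := by omega
          rw [if_neg (show ¬((normalized.length / 5 : Nat) : Int) = 0 from by exact_mod_cast hz)]
          have hm1 : ((normalized.countP (fun e => decide (e ≤ x)) : Int) - 1)
              = ((normalized.countP (fun e => decide (e ≤ x)) - 1 : Nat) : Int) := by omega
          rw [hm1]
          rw [show PySem.Int.floordiv
                ((normalized.countP (fun e => decide (e ≤ x)) - 1 : Nat) : Int)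
                ((normalized.length / 5 : Nat) : Int)
              = (((normalized.countP (fun e => decide (e ≤ x)) - 1) / (normalized.length / 5) : Nat) : Int) from by
            exact_mod_cast PySem.Int.floordiv_natCast _ _]
          rw [show ((5 : Int) - 1) = 4 from by norm_num,
            ← min_ind4 (normalized.countP (fun e => decide (e ≤ x))) (normalized.length / 5) hz1]
          split_ifs <;> norm_num
      · exact absurd rfl habs
    · simp [h2, h5]
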